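-- pv_equiv track=rewrite | github.com/ZoomyLab/zoomy-gui | snippets/mesh_mpl.py | _boundary_faces_3d
-- ===== SOURCE A (Python) =====
-- from collections import Counter
--
-- def _boundary_faces_3d(cells):
--     n_per = cells.shape[1] if hasattr(cells, "shape") and len(cells.shape) > 1 else len(cells[0])
--     if n_per == 4:
--         face_defs = [[0,1,2],[0,1,3],[0,2,3],[1,2,3]]
--     elif n_per == 8:
--         face_defs = [[0,1,2,3],[4,5,6,7],[0,1,5,4],[2,3,7,6],[0,3,7,4],[1,2,6,5]]
--     else: return [], []
--     count, fmap, parent = Counter(), {}, {}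
--     for ci, cell in enumerate(cells):
--         for fi in face_defs:
--             nodes = [int(cell[k]) for k in fi]
--             key = tuple(sorted(nodes))
--             count[key] += 1
--             fmap[key] = nodes
--             parent[key] = ci
--     faces, face_cells = [], []
--     for k, c in count.items():
--         if c == 1:
--             faces.append(fmap[k]); face_cells.append(parent[k])
--     return faces, face_cells
-- ===== SOURCE B (Python) =====
-- def _boundary_faces_3d(cells):
--     n_per = cells.shape[1] if hasattr(cells, "shape") and len(cells.shape) > 1 else len(cells[0])
--     if n_per == 4:
--         face_defs = [[0,1,2],[0,1,3],[0,2,3],[1,2,3]]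
--     elif n_per == 8:
--         face_defs = [[0,1,2,3],[4,5,6,7],[0,1,5,4],[2,3,7,6],[0,3,7,4],[1,2,6,5]]
--     else:
--         return [], []
--     # pass 1: count occurrences of each (orientation-independent) face key
--     count = {}
--     for cell in cells:
--         for fi in face_defs:
--             key = tuple(sorted(int(cell[k]) for k in fi))
--             count[key] = count.get(key, 0) + 1
--     # pass 2: stream out the faces seen exactly once, in occurrence order
--     faces, face_cells = [], []
--     for ci, cell in enumerate(cells):
--         for fi in face_defs:
--             nodes = [int(cell[k]) for k in fi]
--             if count[tuple(sorted(nodes))] == 1: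
--                 faces.append(nodes)
--                 face_cells.append(ci)
--     return faces, face_cells
-- ===== Notes on version B (the rewrite author's own statement) =====
-- stated objective: alternative
-- what changed: Replaces A's three parallel dicts (Counter + last-nodes map + last-cell map) iterated via Counter.items with a single count dict built in pass 1 and a second streaming pass over the cells that emits each once-seen face directly in occurrence order, so the fmap/parent dicts and the dict-items iteration disappear.
import Mathlib
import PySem

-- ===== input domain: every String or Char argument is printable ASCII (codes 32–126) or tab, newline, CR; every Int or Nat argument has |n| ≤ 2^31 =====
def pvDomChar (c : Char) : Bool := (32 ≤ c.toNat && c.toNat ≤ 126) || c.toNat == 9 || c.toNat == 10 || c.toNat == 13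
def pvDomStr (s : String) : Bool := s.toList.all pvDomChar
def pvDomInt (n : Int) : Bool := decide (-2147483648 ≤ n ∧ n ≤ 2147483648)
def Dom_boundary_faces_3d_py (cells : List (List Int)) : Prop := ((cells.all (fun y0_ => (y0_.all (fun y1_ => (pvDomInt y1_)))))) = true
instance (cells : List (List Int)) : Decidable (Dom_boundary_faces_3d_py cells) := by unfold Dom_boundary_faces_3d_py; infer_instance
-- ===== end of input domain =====

-- B is an alternative two-pass formulation (count dict + streaming second pass) of A's
-- three-dict Counter/fmap/parent algorithm; equal return value, no speed claim.

-- ===== PORT A =====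
-- [int(cell[k]) for k in fi]  (shared sub-expression of both Pythons)
def pvNodes (cell : List Int) (fi : List Int) : List Int :=
  fi.map (fun k => (PySem.List.pyGet? cell k).getD 0)

-- tuple(sorted(nodes))
def pvKey (nodes : List Int) : List Int := PySem.List.sorted nodes id

def pvFaceDefs4 : List (List Int) := [[0,1,2],[0,1,3],[0,2,3],[1,2,3]]
def pvFaceDefs8 : List (List Int) := [[0,1,2,3],[4,5,6,7],[0,1,5,4],[2,3,7,6],[0,3,7,4],[1,2,6,5]]

-- A's body after face_defs has been chosen: the count/fmap/parent loop, then the items loop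
def pvACore (cells : List (List Int)) (fds : List (List Int)) : List (List Int) × List Int :=
  let st := (PySem.List.enumerate cells).foldl (fun st p => fds.foldl (fun st fi =>
      let nodes := pvNodes p.2 fi
      let key := pvKey nodes
      (st.1.insert key (st.1.getD key 0 + 1), st.2.1.insert key nodes, st.2.2.insert key p.1)) st)
    ((PySem.Dict.empty, PySem.Dict.empty, PySem.Dict.empty) :
      PySem.Dict (List Int) Int × PySem.Dict (List Int) (List Int) × PySem.Dict (List Int) Int)
  st.1.items.foldl (fun acc kv =>
      if kv.2 == (1 : Int) then (acc.1 ++ [st.2.1.getD kv.1 []], acc.2 ++ [st.2.2.getD kv.1 0]) else acc)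
    ([], [])

def boundary_faces_3d_py (cells : List (List Int)) : List (List Int) × List Int :=
  let n_per := (cells.headD []).length
  if n_per = 4 then pvACore cells pvFaceDefs4
  else if n_per = 8 then pvACore cells pvFaceDefs8
  else ([], [])

-- ===== PORT B =====
-- B's body after face_defs has been chosen: pass 1 builds the count dict, pass 2 streams output
def pvBCore (cells : List (List Int)) (fds : List (List Int)) : List (List Int) × List Int :=
  let cnt := cells.foldl (fun d cell => fds.foldl (fun d fi =>
      let key := pvKey (pvNodes cell fi)
      d.insert key (d.getD key 0 + 1)) d) (PySem.Dict.empty : PySem.Dict (List Int) Int)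
  (PySem.List.enumerate cells).foldl (fun acc p => fds.foldl (fun acc fi =>
      let nodes := pvNodes p.2 fi
      if cnt.getD (pvKey nodes) 0 == (1 : Int) then (acc.1 ++ [nodes], acc.2 ++ [p.1]) else acc) acc)
    ([], [])

def boundary_faces_3d_py_alt (cells : List (List Int)) : List (List Int) × List Int :=
  let n_per := (cells.headD []).length
  if n_per = 4 then pvBCore cells pvFaceDefs4
  else if n_per = 8 then pvBCore cells pvFaceDefs8
  else ([], [])

-- ===== PRECONDITION & SPEC =====
-- Pre_ excludes exactly the inputs where Python A raises IndexError: the empty cell list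
-- (cells[0]) and, when the first row selects tet/hex face tables, rows too short for the
-- face indices (cell[k]).
def Pre_boundary_faces_3d_py (cells : List (List Int)) : Prop :=
  cells ≠ [] ∧
  ((cells.headD []).length = 4 → ∀ c ∈ cells, 4 ≤ c.length) ∧
  ((cells.headD []).length = 8 → ∀ c ∈ cells, 8 ≤ c.length)
instance (cells : List (List Int)) : Decidable (Pre_boundary_faces_3d_py cells) := by
  unfold Pre_boundary_faces_3d_py; infer_instance

def pvWitness_boundary_faces_3d_py : List (List Int) := [[0,1,2,3],[1,2,3,4]]

def Spec_boundary_faces_3d_py (cells : List (List Int)) (out : List (List Int) × List Int) : Prop := out = boundary_faces_3d_py_alt cells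
instance (cells : List (List Int)) (out : List (List Int) × List Int) : Decidable (Spec_boundary_faces_3d_py cells out) := by unfold Spec_boundary_faces_3d_py; infer_instance

-- ===== CLAIM (what is proved, stated in full; the proofs are below) =====
def Claim_equal_boundary_faces_3d_py : Prop := ∀ (cells : List (List Int)), Dom_boundary_faces_3d_py cells → Pre_boundary_faces_3d_py cells → Spec_boundary_faces_3d_py cells (boundary_faces_3d_py cells)

-- ===== LEMMAS AND PROOFS =====

-- the flat occurrence list: one (nodes, cell-index) record per face of every cell
def pvOcc (cells : List (List Int)) (fds : List (List Int)) : List (List Int × Int) :=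
  (PySem.List.enumerate cells).flatMap (fun p => fds.map (fun fi => (pvNodes p.2 fi, p.1)))

def pvKeyOf (t : List Int × Int) : List Int := pvKey t.1

-- paired append-if loop shape
theorem pv_foldl_append_if_pair {α β γ : Type} (p : α → Bool) (f : α → β) (g : α → γ) :
    ∀ (l : List α) (as : List β) (bs : List γ),
    l.foldl (fun acc x => if p x then (acc.1 ++ [f x], acc.2 ++ [g x]) else acc) (as, bs)
      = (as ++ (l.filter p).map f, bs ++ (l.filter p).map g) := by
  intro l
  induction l with
  | nil => simp
  | cons x xs ih =>
    intro as bs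
    by_cases h : p x = true <;> simp [h, ih]

-- a fold over enumerate that ignores the index is a fold over the list
theorem pv_foldl_enumerate_snd {α σ : Type} (F : σ → α → σ) :
    ∀ (l : List α) (s : σ) (start : Int),
    (PySem.List.enumerate l start).foldl (fun d p => F d p.2) s = l.foldl F s := by
  intro l
  induction l with
  | nil => intro s start; simp [PySem.List.enumerate]
  | cons x xs ih => intro s start; simp [PySem.List.enumerate, ih]

-- last-write dict built by inserting (key t ↦ val t): lookup is the last matching record
theorem pv_getD_foldl_insert_key {T V : Type} (key : T → List Int) (val : T → V) :
    ∀ (l : List T) (d : PySem.Dict (List Int) V) (k : List Int) (dflt : V),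
    (l.foldl (fun d t => d.insert (key t) (val t)) d).getD k dflt
      = ((l.filter (fun t => key t == k)).map val).getLastD (d.getD k dflt) := by
  intro l
  induction l with
  | nil => intro d k dflt; rfl
  | cons x xs ih =>
    intro d k dflt
    rw [List.foldl_cons, ih]
    by_cases h : key x = k
    · rw [List.filter_cons, if_pos (by simp [h]), List.map_cons, List.getLastD_cons,
        PySem.Dict.getD_insert, if_pos h.symm]
    · rw [List.filter_cons, if_neg (by simp [h]), PySem.Dict.getD_insert,
        if_neg (fun he => h he.symm)]

-- first-occurrence dedup is the identity (under filter q) when every q-key occurs at most once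
theorem pv_set_filter_unique (q : List Int → Bool) :
    ∀ (ks : List (List Int)) (s : PySem.Set (List Int)),
    (∀ k ∈ ks, q k = true → ks.count k ≤ 1 ∧ s.contains k = false) →
    (List.foldl PySem.Set.add s ks).filter q = s.filter q ++ ks.filter q := by
  intro ks
  induction ks with
  | nil => intro s _; simp
  | cons x xs ih =>
    intro s H
    have hstep : (List.foldl PySem.Set.add (PySem.Set.add s x) xs).filter q
        = (PySem.Set.add s x).filter q ++ xs.filter q := by
      apply ih
      intro k hk hq
      have hcx := H k (List.mem_cons_of_mem x hk) hq
      have hcount : xs.count k ≤ 1 := by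
        have h2 : xs.count k ≤ (x :: xs).count k := by
          rw [List.count_cons]; omega
        omega
      refine ⟨hcount, ?_⟩
      have hkx : k ≠ x := by
        intro he
        subst he
        have h1 : 1 ≤ xs.count k := List.one_le_count_iff.mpr hk
        have h2 : (k :: xs).count k = xs.count k + 1 := by
          rw [List.count_cons]; simp
        omega
      unfold PySem.Set.add
      split
      · exact hcx.2
      · have : (s ++ [x]).contains k = (s.contains k || [x].contains k) := by
          simp
        rw [this, hcx.2]
        simp [hkx]
    rw [List.foldl_cons, hstep]
    by_cases hq : q x = true
    · have hs : s.contains x = false := (H x List.mem_cons_self hq).2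
      have hadd : PySem.Set.add s x = s ++ [x] := by
        unfold PySem.Set.add; rw [if_neg (by rw [hs]; exact Bool.false_ne_true)]
      simp [hadd, List.filter_append, hq]
    · have hqf : q x = false := by simpa using hq
      have hrw : (PySem.Set.add s x).filter q = s.filter q := by
        unfold PySem.Set.add
        by_cases hc : s.contains x = true
        · rw [if_pos hc]
        · rw [if_neg hc]
          simp [List.filter_append, hqf]
      simp [hrw, hqf]

-- a fold on a triple state whose components do not interact is a triple of folds
theorem pv_foldl_triple {β σ₁ σ₂ σ₃ : Type} (f : σ₁ → β → σ₁) (g : σ₂ → β → σ₂) (h : σ₃ → β → σ₃) :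
    ∀ (l : List β) (a : σ₁) (b : σ₂) (c : σ₃),
    l.foldl (fun s e => (f s.1 e, g s.2.1 e, h s.2.2 e)) (a, b, c)
      = (l.foldl f a, l.foldl g b, l.foldl h c) := by
  intro l
  induction l with
  | nil => intro a b c; rfl
  | cons x xs ih => intro a b c; rw [List.foldl_cons, List.foldl_cons, List.foldl_cons,
      List.foldl_cons]; exact ih _ _ _

-- the core equality: A's body equals B's body for any face table
theorem pvCore_eq (cells : List (List Int)) (fds : List (List Int)) :
    pvACore cells fds = pvBCore cells fds := by
  classical
  set occ := pvOcc cells fds with hocc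
  set ks := occ.map pvKeyOf with hks
  -- A's nested triple-dict loop as a flat fold over occ
  have hAfold :
      (PySem.List.enumerate cells).foldl (fun st p => fds.foldl (fun st fi =>
          let nodes := pvNodes p.2 fi
          let key := pvKey nodes
          (st.1.insert key (st.1.getD key 0 + 1), st.2.1.insert key nodes, st.2.2.insert key p.1)) st)
        ((PySem.Dict.empty, PySem.Dict.empty, PySem.Dict.empty) :
          PySem.Dict (List Int) Int × PySem.Dict (List Int) (List Int) × PySem.Dict (List Int) Int)
      = occ.foldl (fun st t =>
          (st.1.insert (pvKeyOf t) (st.1.getD (pvKeyOf t) 0 + 1),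
           st.2.1.insert (pvKeyOf t) t.1, st.2.2.insert (pvKeyOf t) t.2))
        (PySem.Dict.empty, PySem.Dict.empty, PySem.Dict.empty) := by
    rw [hocc]; unfold pvOcc
    rw [List.foldl_flatMap]
    simp [List.foldl_map, pvKeyOf]
  -- split the triple fold into three independent dict folds
  have hsplit : occ.foldl (fun st t =>
          (st.1.insert (pvKeyOf t) (st.1.getD (pvKeyOf t) 0 + 1),
           st.2.1.insert (pvKeyOf t) t.1, st.2.2.insert (pvKeyOf t) t.2))
        ((PySem.Dict.empty, PySem.Dict.empty, PySem.Dict.empty) :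
          PySem.Dict (List Int) Int × PySem.Dict (List Int) (List Int) × PySem.Dict (List Int) Int)
      = (occ.foldl (fun d t => d.insert (pvKeyOf t) (d.getD (pvKeyOf t) 0 + 1)) PySem.Dict.empty,
         occ.foldl (fun d t => d.insert (pvKeyOf t) t.1) PySem.Dict.empty,
         occ.foldl (fun d t => d.insert (pvKeyOf t) t.2) PySem.Dict.empty) :=
    pv_foldl_triple
      (f := fun (d : PySem.Dict (List Int) Int) (t : List Int × Int) =>
        d.insert (pvKeyOf t) (d.getD (pvKeyOf t) 0 + 1))
      (g := fun (d : PySem.Dict (List Int) (List Int)) (t : List Int × Int) =>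
        d.insert (pvKeyOf t) t.1)
      (h := fun (d : PySem.Dict (List Int) Int) (t : List Int × Int) =>
        d.insert (pvKeyOf t) t.2)
      occ PySem.Dict.empty PySem.Dict.empty PySem.Dict.empty
  -- the count dict is the counter of the key list
  have hcount : occ.foldl (fun d t => d.insert (pvKeyOf t) (d.getD (pvKeyOf t) 0 + 1)) PySem.Dict.empty
      = PySem.Dict.counter ks := by
    rw [hks, ← PySem.Dict.foldl_insert_getD_add_one_eq_counter, List.foldl_map]
  -- B's count dict is the same counter
  have hBcount : cells.foldl (fun d cell => fds.foldl (fun d fi =>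
        let key := pvKey (pvNodes cell fi)
        d.insert key (d.getD key 0 + 1)) d) (PySem.Dict.empty : PySem.Dict (List Int) Int)
      = PySem.Dict.counter ks := by
    rw [← hcount]
    calc cells.foldl (fun d cell => fds.foldl (fun d fi =>
            let key := pvKey (pvNodes cell fi)
            d.insert key (d.getD key 0 + 1)) d) (PySem.Dict.empty : PySem.Dict (List Int) Int)
        = (PySem.List.enumerate cells 0).foldl (fun d p => fds.foldl (fun d fi =>
            let key := pvKey (pvNodes p.2 fi)
            d.insert key (d.getD key 0 + 1)) d) PySem.Dict.empty :=
          (pv_foldl_enumerate_snd (F := fun (d : PySem.Dict (List Int) Int) (cell : List Int) =>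
            fds.foldl (fun d fi =>
              let key := pvKey (pvNodes cell fi)
              d.insert key (d.getD key 0 + 1)) d) cells PySem.Dict.empty 0).symm
      _ = occ.foldl (fun d t => d.insert (pvKeyOf t) (d.getD (pvKeyOf t) 0 + 1))
            PySem.Dict.empty := by
          rw [hocc]; unfold pvOcc
          rw [List.foldl_flatMap]
          simp [List.foldl_map, pvKeyOf]
  -- B's output loop as a flat fold over occ
  have hBout : ∀ (cnt : PySem.Dict (List Int) Int),
      (PySem.List.enumerate cells).foldl (fun acc p => fds.foldl (fun acc fi =>
          let nodes := pvNodes p.2 fi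
          if cnt.getD (pvKey nodes) 0 == (1 : Int) then (acc.1 ++ [nodes], acc.2 ++ [p.1]) else acc) acc)
        (([], []) : List (List Int) × List Int)
      = occ.foldl (fun acc t =>
          if cnt.getD (pvKeyOf t) 0 == (1 : Int) then (acc.1 ++ [t.1], acc.2 ++ [t.2]) else acc) ([], []) := by
    intro cnt
    rw [hocc]; unfold pvOcc
    rw [List.foldl_flatMap]
    simp [List.foldl_map, pvKeyOf]
  -- the unique-count predicate
  set q : List Int → Bool := fun k => ((ks.count k : Int) == (1 : Int)) with hq
  have hq1 : ∀ k, q k = true → ks.count k = 1 := by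
    intro k h
    rw [hq] at h
    simp at h
    exact_mod_cast h
  -- A's surviving key list = key list of B's surviving records
  have hkeys : (List.foldl PySem.Set.add (PySem.Set.empty) ks).filter q
      = (occ.filter (fun t => q (pvKeyOf t))).map pvKeyOf := by
    have h1 : (List.foldl PySem.Set.add (PySem.Set.empty) ks).filter q
        = (PySem.Set.empty : PySem.Set (List Int)).filter q ++ ks.filter q := by
      apply pv_set_filter_unique
      intro k _ hk
      refine ⟨by rw [hq1 k hk], by simp [PySem.Set.empty]⟩
    rw [h1, hks, List.filter_map]
    simp only [PySem.Set.empty, List.filter_nil, List.nil_append]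
    rfl
  -- on a surviving record, the last-write dicts return that record's own fields
  have hlast : ∀ (α : Type) (val : List Int × Int → α) (dflt : α) (t : List Int × Int),
      t ∈ occ → q (pvKeyOf t) = true →
      (occ.foldl (fun d s => d.insert (pvKeyOf s) (val s)) PySem.Dict.empty).getD (pvKeyOf t) dflt
        = val t := by
    intro α val dflt t ht hqt
    rw [pv_getD_foldl_insert_key]
    have hcnt : (occ.filter (fun s => pvKeyOf s == pvKeyOf t)).length = 1 := by
      have : (occ.filter (fun s => pvKeyOf s == pvKeyOf t)).length
          = ks.count (pvKeyOf t) := by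
        rw [hks, List.count_eq_countP, List.countP_map, ← List.countP_eq_length_filter]
        rfl
      rw [this, hq1 _ hqt]
    have hmem : t ∈ occ.filter (fun s => pvKeyOf s == pvKeyOf t) := by
      simp [List.mem_filter, ht]
    obtain ⟨a, ha⟩ := List.length_eq_one_iff.mp hcnt
    rw [ha] at hmem
    simp at hmem
    subst hmem
    simp [ha, PySem.Dict.empty]
  -- assemble
  show pvACore cells fds = pvBCore cells fds
  unfold pvACore pvBCore
  simp only []
  rw [hAfold, hsplit, hBcount, hBout, hcount]
  rw [PySem.Dict.items_counter]
  rw [pv_foldl_append_if_pair, pv_foldl_append_if_pair]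
  simp only [List.nil_append]
  have hfilt : (List.filter (fun kv => kv.2 == (1 : Int))
        ((PySem.Set.ofList ks).map (fun k => (k, (ks.count k : Int)))))
      = ((List.foldl PySem.Set.add (PySem.Set.empty) ks).filter q).map
          (fun k => (k, (ks.count k : Int))) := by
    rw [List.filter_map]
    rfl
  have hfilt2 : occ.filter (fun t => PySem.Dict.getD (PySem.Dict.counter ks) (pvKeyOf t) 0 == (1 : Int))
      = occ.filter (fun t => q (pvKeyOf t)) := by
    apply List.filter_congr
    intro t _
    rw [PySem.Dict.getD_counter, hq]
  rw [hfilt, hkeys, hfilt2]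
  simp only [Prod.mk.injEq]
  refine ⟨?_, ?_⟩
  · simp only [List.map_map]
    apply List.map_congr_left
    intro t ht
    have htq := List.mem_filter.mp ht
    simpa [Function.comp] using hlast _ (fun s => s.1) [] t htq.1 htq.2
  · simp only [List.map_map]
    apply List.map_congr_left
    intro t ht
    have htq := List.mem_filter.mp ht
    simpa [Function.comp] using hlast _ (fun s => s.2) 0 t htq.1 htq.2

-- ===== VERDICT (by name: the statement is the Claim_ definition above) =====
theorem boundary_faces_3d_py_spec : Claim_equal_boundary_faces_3d_py := by
  intro cells _ _
  unfold Spec_boundary_faces_3d_py boundary_faces_3d_py boundary_faces_3d_py_alt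
  simp only []
  split_ifs <;> first | rfl | exact pvCore_eq cells _
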